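-- pv_equiv track=rewrite | github.com/Fitals/transformers-forge | src/transformers/dataset_utils.py | _calculate_length_distribution
-- ===== SOURCE A (Python) =====
-- from typing import Any, Callable, Dict, List, Optional, Union
--
-- def _calculate_length_distribution(lengths: List[int]) -> Dict[str, int]:
--     """Calculate distribution of token lengths."""
--     distribution = {
--         "0-128": 0,
--         "128-256": 0,
--         "256-512": 0,
--         "512-1024": 0,
--         "1024-2048": 0,
--         "2048-4096": 0,
--         "4096+": 0,
--     }
--
--     for length in lengths:
--         if length <= 128:
--             distribution["0-128"] += 1
--         elif length <= 256:
--             distribution["128-256"] += 1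
--         elif length <= 512:
--             distribution["256-512"] += 1
--         elif length <= 1024:
--             distribution["512-1024"] += 1
--         elif length <= 2048:
--             distribution["1024-2048"] += 1
--         elif length <= 4096:
--             distribution["2048-4096"] += 1
--         else:
--             distribution["4096+"] += 1
--
--     return distribution
-- ===== SOURCE B (Python) =====
-- from typing import Any, Callable, Dict, List, Optional, Union
--
-- def _calculate_length_distribution(lengths: List[int]) -> Dict[str, int]:
--     """Calculate distribution of token lengths via a boundary table instead of an if/elif chain."""
--     labels = ["0-128", "128-256", "256-512", "512-1024", "1024-2048", "2048-4096", "4096+"]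
--     boundaries = [128, 256, 512, 1024, 2048, 4096]
--     counts = [0] * 7
--     for x in lengths:
--         counts[sum(1 for b in boundaries if b < x)] += 1
--     return dict(zip(labels, counts))
-- ===== Notes on version B (the rewrite author's own statement) =====
-- stated objective: idiomatic
-- what changed: Replaces the if/elif chain over a pre-keyed dict with a boundary table: the bucket index is computed as the number of boundaries below the length, counts accumulate in a plain 7-slot list, and the labelled dict is built once at the end with dict(zip(labels, counts)).
import Mathlib
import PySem

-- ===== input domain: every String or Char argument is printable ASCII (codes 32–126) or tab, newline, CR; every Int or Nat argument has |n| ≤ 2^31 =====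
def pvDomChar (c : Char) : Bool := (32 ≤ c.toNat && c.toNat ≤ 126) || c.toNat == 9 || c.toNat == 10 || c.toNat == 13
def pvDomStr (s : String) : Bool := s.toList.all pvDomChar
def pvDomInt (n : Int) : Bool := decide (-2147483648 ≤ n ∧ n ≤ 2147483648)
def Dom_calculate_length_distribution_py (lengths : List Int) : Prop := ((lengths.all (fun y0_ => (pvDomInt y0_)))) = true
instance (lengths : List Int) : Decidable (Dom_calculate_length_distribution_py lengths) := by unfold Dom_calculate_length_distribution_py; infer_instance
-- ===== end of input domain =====

-- B replaces A's if/elif chain and pre-keyed dict with a boundary table: the bucket index is the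
-- number of boundaries below the length, counts live in a plain array, and the dict is zipped at the
-- end (objective: idiomatic; same O(n) cost).


-- ===== PORT A =====
-- loop body of A: the if/elif chain, `distribution[k] += 1` = insert k (getD k 0 + 1) (key always present)
def stepA (d : PySem.Dict String Int) (length : Int) : PySem.Dict String Int :=
  if length ≤ 128 then d.insert "0-128" (d.getD "0-128" 0 + 1)
  else if length ≤ 256 then d.insert "128-256" (d.getD "128-256" 0 + 1)
  else if length ≤ 512 then d.insert "256-512" (d.getD "256-512" 0 + 1)
  else if length ≤ 1024 then d.insert "512-1024" (d.getD "512-1024" 0 + 1)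
  else if length ≤ 2048 then d.insert "1024-2048" (d.getD "1024-2048" 0 + 1)
  else if length ≤ 4096 then d.insert "2048-4096" (d.getD "2048-4096" 0 + 1)
  else d.insert "4096+" (d.getD "4096+" 0 + 1)

def calculate_length_distribution_py (lengths : List Int) : List (String × Int) :=
  let distribution : PySem.Dict String Int := PySem.Dict.ofList
    [("0-128", 0), ("128-256", 0), ("256-512", 0), ("512-1024", 0),
     ("1024-2048", 0), ("2048-4096", 0), ("4096+", 0)]
  (lengths.foldl stepA distribution).items

-- ===== PORT B =====
def pvLabels : List String :=
  ["0-128", "128-256", "256-512", "512-1024", "1024-2048", "2048-4096", "4096+"]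
def pvBoundaries : List Int := [128, 256, 512, 1024, 2048, 4096]

-- loop body of B: `counts[sum(1 for b in boundaries if b < x)] += 1`; the index is always < 7,
-- so list read/set never leave the range and List.getD/List.set are exact here.
def stepB (counts : List Int) (x : Int) : List Int :=
  let i := (pvBoundaries.filter (fun b => decide (b < x))).length
  counts.set i (counts.getD i 0 + 1)

def calculate_length_distribution_py_alt (lengths : List Int) : List (String × Int) :=
  let counts := lengths.foldl stepB (List.replicate 7 0)
  (PySem.Dict.ofList (pvLabels.zip counts)).items

-- ===== PRECONDITION & SPEC =====
def Spec_calculate_length_distribution_py (lengths : List Int) (out : List (String × Int)) : Prop := out = calculate_length_distribution_py_alt lengths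
instance (lengths : List Int) (out : List (String × Int)) : Decidable (Spec_calculate_length_distribution_py lengths out) := by unfold Spec_calculate_length_distribution_py; infer_instance

-- ===== CLAIM (what is proved, stated in full; the proofs are below) =====
def Claim_equal_calculate_length_distribution_py : Prop := ∀ (lengths : List Int), Dom_calculate_length_distribution_py lengths → Spec_calculate_length_distribution_py lengths (calculate_length_distribution_py lengths)

-- ===== LEMMAS AND PROOFS =====

-- Dict.ofList over the seven distinct literal keys is just the underlying list.
theorem ofList_seven (c0 c1 c2 c3 c4 c5 c6 : Int) :
    PySem.Dict.ofList [("0-128", c0), ("128-256", c1), ("256-512", c2), ("512-1024", c3),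
      ("1024-2048", c4), ("2048-4096", c5), ("4096+", c6)]
    = PySem.Dict.mk [("0-128", c0), ("128-256", c1), ("256-512", c2), ("512-1024", c3),
      ("1024-2048", c4), ("2048-4096", c5), ("4096+", c6)] := by
  simp [PySem.Dict.ofList, PySem.Dict.insert, PySem.Dict.contains, PySem.Dict.empty,
    PySem.Dict.update]

theorem stepB_length (x : Int) (cs : List Int) : (stepB cs x).length = cs.length := by
  simp [stepB]

theorem foldl_stepB_length (l : List Int) (cs : List Int) :
    (l.foldl stepB cs).length = cs.length := by
  induction l generalizing cs with
  | nil => rfl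
  | cons x t ih => simp [List.foldl, ih, stepB_length]

-- The two loops, run from matching states, stay matched.
theorem fold_match (l : List Int) (a0 a1 a2 a3 a4 a5 a6 : Int) :
    (l.foldl stepA (PySem.Dict.mk [("0-128", a0), ("128-256", a1), ("256-512", a2),
      ("512-1024", a3), ("1024-2048", a4), ("2048-4096", a5), ("4096+", a6)])).items
    = pvLabels.zip (l.foldl stepB [a0, a1, a2, a3, a4, a5, a6]) := by
  induction l generalizing a0 a1 a2 a3 a4 a5 a6 with
  | nil => simp [pvLabels]
  | cons x t ih =>
    by_cases h0 : x ≤ 128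
    · have e : stepB [a0, a1, a2, a3, a4, a5, a6] x = [a0 + 1, a1, a2, a3, a4, a5, a6] := by
        simp [stepB, pvBoundaries, show ¬(128 < x) by omega, show ¬(256 < x) by omega, show ¬(512 < x) by omega, show ¬(1024 < x) by omega, show ¬(2048 < x) by omega, show ¬(4096 < x) by omega]
      have eA : stepA (PySem.Dict.mk [("0-128", a0), ("128-256", a1), ("256-512", a2),
          ("512-1024", a3), ("1024-2048", a4), ("2048-4096", a5), ("4096+", a6)]) x
          = PySem.Dict.mk [("0-128", a0 + 1), ("128-256", a1), ("256-512", a2),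
          ("512-1024", a3), ("1024-2048", a4), ("2048-4096", a5), ("4096+", a6)] := by
        simp [stepA, h0, PySem.Dict.insert, PySem.Dict.getD, PySem.Dict.get?, PySem.Dict.contains]
      simp only [List.foldl, e, eA, ih]
    · by_cases h1 : x ≤ 256
      · have e : stepB [a0, a1, a2, a3, a4, a5, a6] x = [a0, a1 + 1, a2, a3, a4, a5, a6] := by
          simp [stepB, pvBoundaries, show 128 < x by omega, show ¬(256 < x) by omega, show ¬(512 < x) by omega, show ¬(1024 < x) by omega, show ¬(2048 < x) by omega, show ¬(4096 < x) by omega]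
        have eA : stepA (PySem.Dict.mk [("0-128", a0), ("128-256", a1), ("256-512", a2),
            ("512-1024", a3), ("1024-2048", a4), ("2048-4096", a5), ("4096+", a6)]) x
            = PySem.Dict.mk [("0-128", a0), ("128-256", a1 + 1), ("256-512", a2),
            ("512-1024", a3), ("1024-2048", a4), ("2048-4096", a5), ("4096+", a6)] := by
          simp [stepA, h0, h1, PySem.Dict.insert, PySem.Dict.getD, PySem.Dict.get?,
            PySem.Dict.contains]
        simp only [List.foldl, e, eA, ih]
      · by_cases h2 : x ≤ 512
        · have e : stepB [a0, a1, a2, a3, a4, a5, a6] x = [a0, a1, a2 + 1, a3, a4, a5, a6] := by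
            simp [stepB, pvBoundaries, show 128 < x by omega, show 256 < x by omega, show ¬(512 < x) by omega, show ¬(1024 < x) by omega, show ¬(2048 < x) by omega, show ¬(4096 < x) by omega]
          have eA : stepA (PySem.Dict.mk [("0-128", a0), ("128-256", a1), ("256-512", a2),
              ("512-1024", a3), ("1024-2048", a4), ("2048-4096", a5), ("4096+", a6)]) x
              = PySem.Dict.mk [("0-128", a0), ("128-256", a1), ("256-512", a2 + 1),
              ("512-1024", a3), ("1024-2048", a4), ("2048-4096", a5), ("4096+", a6)] := by
            simp [stepA, h0, h1, h2, PySem.Dict.insert, PySem.Dict.getD, PySem.Dict.get?,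
              PySem.Dict.contains]
          simp only [List.foldl, e, eA, ih]
        · by_cases h3 : x ≤ 1024
          · have e : stepB [a0, a1, a2, a3, a4, a5, a6] x = [a0, a1, a2, a3 + 1, a4, a5, a6] := by
              simp [stepB, pvBoundaries, show 128 < x by omega, show 256 < x by omega, show 512 < x by omega, show ¬(1024 < x) by omega, show ¬(2048 < x) by omega, show ¬(4096 < x) by omega]
            have eA : stepA (PySem.Dict.mk [("0-128", a0), ("128-256", a1), ("256-512", a2),
                ("512-1024", a3), ("1024-2048", a4), ("2048-4096", a5), ("4096+", a6)]) x
                = PySem.Dict.mk [("0-128", a0), ("128-256", a1), ("256-512", a2),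
                ("512-1024", a3 + 1), ("1024-2048", a4), ("2048-4096", a5), ("4096+", a6)] := by
              simp [stepA, h0, h1, h2, h3, PySem.Dict.insert, PySem.Dict.getD, PySem.Dict.get?,
                PySem.Dict.contains]
            simp only [List.foldl, e, eA, ih]
          · by_cases h4 : x ≤ 2048
            · have e : stepB [a0, a1, a2, a3, a4, a5, a6] x
                  = [a0, a1, a2, a3, a4 + 1, a5, a6] := by
                simp [stepB, pvBoundaries, show 128 < x by omega, show 256 < x by omega, show 512 < x by omega, show 1024 < x by omega, show ¬(2048 < x) by omega, show ¬(4096 < x) by omega]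
              have eA : stepA (PySem.Dict.mk [("0-128", a0), ("128-256", a1), ("256-512", a2),
                  ("512-1024", a3), ("1024-2048", a4), ("2048-4096", a5), ("4096+", a6)]) x
                  = PySem.Dict.mk [("0-128", a0), ("128-256", a1), ("256-512", a2),
                  ("512-1024", a3), ("1024-2048", a4 + 1), ("2048-4096", a5), ("4096+", a6)] := by
                simp [stepA, h0, h1, h2, h3, h4, PySem.Dict.insert, PySem.Dict.getD,
                  PySem.Dict.get?, PySem.Dict.contains]
              simp only [List.foldl, e, eA, ih]
            · by_cases h5 : x ≤ 4096
              · have e : stepB [a0, a1, a2, a3, a4, a5, a6] x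
                    = [a0, a1, a2, a3, a4, a5 + 1, a6] := by
                  simp [stepB, pvBoundaries, show 128 < x by omega, show 256 < x by omega, show 512 < x by omega, show 1024 < x by omega, show 2048 < x by omega, show ¬(4096 < x) by omega]
                have eA : stepA (PySem.Dict.mk [("0-128", a0), ("128-256", a1), ("256-512", a2),
                    ("512-1024", a3), ("1024-2048", a4), ("2048-4096", a5), ("4096+", a6)]) x
                    = PySem.Dict.mk [("0-128", a0), ("128-256", a1), ("256-512", a2),
                    ("512-1024", a3), ("1024-2048", a4), ("2048-4096", a5 + 1), ("4096+", a6)] := by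
                  simp [stepA, h0, h1, h2, h3, h4, h5, PySem.Dict.insert, PySem.Dict.getD,
                    PySem.Dict.get?, PySem.Dict.contains]
                simp only [List.foldl, e, eA, ih]
              · have e : stepB [a0, a1, a2, a3, a4, a5, a6] x
                    = [a0, a1, a2, a3, a4, a5, a6 + 1] := by
                  simp [stepB, pvBoundaries, show 128 < x by omega, show 256 < x by omega, show 512 < x by omega, show 1024 < x by omega, show 2048 < x by omega, show 4096 < x by omega]
                have eA : stepA (PySem.Dict.mk [("0-128", a0), ("128-256", a1), ("256-512", a2),
                    ("512-1024", a3), ("1024-2048", a4), ("2048-4096", a5), ("4096+", a6)]) x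
                    = PySem.Dict.mk [("0-128", a0), ("128-256", a1), ("256-512", a2),
                    ("512-1024", a3), ("1024-2048", a4), ("2048-4096", a5), ("4096+", a6 + 1)] := by
                  simp [stepA, h0, h1, h2, h3, h4, h5, PySem.Dict.insert, PySem.Dict.getD,
                    PySem.Dict.get?, PySem.Dict.contains]
                simp only [List.foldl, e, eA, ih]

-- ===== VERDICT (by name: the statement is the Claim_ definition above) =====
theorem calculate_length_distribution_py_spec : Claim_equal_calculate_length_distribution_py := by
  intro lengths _
  unfold Spec_calculate_length_distribution_py
  unfold calculate_length_distribution_py calculate_length_distribution_py_alt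
  have hlen : (lengths.foldl stepB (List.replicate 7 0)).length = 7 := by
    simpa using foldl_stepB_length lengths (List.replicate 7 0)
  obtain ⟨c0, c1, c2, c3, c4, c5, c6, hcs⟩ :
      ∃ c0 c1 c2 c3 c4 c5 c6, lengths.foldl stepB (List.replicate 7 0)
        = [c0, c1, c2, c3, c4, c5, c6] := by
    match h : lengths.foldl stepB (List.replicate 7 0), hlen with
    | [c0, c1, c2, c3, c4, c5, c6], _ => exact ⟨c0, c1, c2, c3, c4, c5, c6, rfl⟩
  rw [ofList_seven]
  rw [show List.replicate 7 (0:Int) = [0,0,0,0,0,0,0] from rfl] at hcs ⊢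
  rw [fold_match, hcs]
  simp [pvLabels, ofList_seven]
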